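-- pv_equiv track=rewrite | github.com/wildcar/movie-handler-clients | src/movie_handler_clients/core/formatters.py | _common_prefix_words
-- ===== SOURCE A (Python) =====
-- def _common_prefix_words(titles: list[str]) -> str:
--     """Longest common prefix, trimmed at the last word/punct boundary.
--
--     Returning a fragment that ends mid-word looks jagged; we snap back
--     to the last whitespace/punctuation so the shown prefix reads as a
--     clean phrase.
--     """
--     if not titles:
--         return ""
--     base = titles[0]
--     n = len(base)
--     for s in titles[1:]:
--         m = min(n, len(s))
--         i = 0
--         while i < m and base[i] == s[i]:
--             i += 1
--         n = i
--         if n == 0: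
--             return ""
--     prefix = base[:n]
--     # Snap to last word/punct boundary so we don't cut inside a word.
--     for i in range(len(prefix) - 1, -1, -1):
--         if prefix[i] in " ,:;/-—–":
--             return prefix[: i + 1]
--     return ""
-- ===== SOURCE B (Python) =====
-- def _common_prefix_words(titles: list[str]) -> str:
--     """Longest common prefix of titles, snapped to the last word/punct boundary."""
--     if not titles:
--         return ""
--     # LCP of the whole list = LCP of its lexicographic min and max.
--     lo = min(titles)
--     hi = max(titles)
--     m = min(len(lo), len(hi))
--     i = 0
--     while i < m and lo[i] == hi[i]:
--         i += 1
--     prefix = lo[:i]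
--     for i in range(len(prefix) - 1, -1, -1):
--         if prefix[i] in " ,:;/-—–":
--             return prefix[: i + 1]
--     return ""
-- ===== Notes on version B (the rewrite author's own statement) =====
-- stated objective: faster
-- what changed: The pairwise LCP reduction over all titles is replaced by taking the lexicographic min and max of the list and computing a single LCP of those two strings (the LCP of a set equals the LCP of its lexicographic extremes); the boundary-snap loop is unchanged.
import Mathlib
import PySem

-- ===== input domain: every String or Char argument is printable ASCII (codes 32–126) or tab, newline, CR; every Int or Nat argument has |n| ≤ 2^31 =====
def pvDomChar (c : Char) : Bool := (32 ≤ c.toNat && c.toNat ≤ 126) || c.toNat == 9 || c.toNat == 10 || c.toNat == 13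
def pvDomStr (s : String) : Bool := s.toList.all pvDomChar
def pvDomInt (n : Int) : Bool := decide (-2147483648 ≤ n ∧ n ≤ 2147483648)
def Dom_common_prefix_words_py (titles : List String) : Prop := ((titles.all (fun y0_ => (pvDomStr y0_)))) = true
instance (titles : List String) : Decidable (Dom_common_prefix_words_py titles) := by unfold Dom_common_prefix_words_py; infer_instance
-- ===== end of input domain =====

-- B replaces A's fold of pairwise LCPs over all titles by a single LCP of the
-- lexicographic min and max title (alternative algorithm); the boundary-snap loop is unchanged.

-- ===== PORT A =====
-- shared by both ports: the character-matching loop `while i < m and x[i] == y[i]: i += 1`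
-- (this while loop appears verbatim in both Python sources)
def pyLcpWhile (a b : List Char) (m i : Nat) : Nat :=
  if _h : i < m then
    if a[i]? = b[i]? then pyLcpWhile a b m (i + 1) else i
  else i
termination_by m - i

-- `prefix[i] in " ,:;/-—–"`
def pyBoundary (c : Char) : Bool :=
  [' ', ',', ':', ';', '/', '-', '—', '–'].contains c

-- `for i in range(len(prefix)-1, -1, -1): if prefix[i] in " ,:;/-—–": return prefix[:i+1]` then `return ""`
-- (this snap loop appears verbatim in both Python sources)
def pySnap (p : List Char) : Nat → String
  | 0 => ""
  | i + 1 => if pyBoundary (p.getD i ' ') then String.mk (p.take (i + 1)) else pySnap p i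

-- A's `for s in titles[1:]` loop carrying state n; `none` models the early `return ""` on n == 0
def aLoop (base : List Char) : Nat → List String → Option Nat
  | n, [] => some n
  | n, s :: rest =>
    let m := min n s.toList.length
    let i := pyLcpWhile base s.toList m 0
    if i = 0 then none else aLoop base i rest

def common_prefix_words_py (titles : List String) : String :=
  match titles with
  | [] => ""
  | base :: rest =>
    let b := base.toList
    match aLoop b b.length rest with
    | none => ""
    | some n =>
      let pre := b.take n
      pySnap pre pre.length

-- ===== PORT B =====
-- Python's `<` on strings: lexicographic by code point (hand port of the builtin comparison; exact)
def strLt : List Char → List Char → Bool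
  | _, [] => false
  | [], _ :: _ => true
  | a :: as, b :: bs =>
    if a.toNat < b.toNat then true
    else if b.toNat < a.toNat then false
    else strLt as bs

def common_prefix_words_py_alt (titles : List String) : String :=
  match titles with
  | [] => ""
  | t :: rest =>
    -- min(titles) / max(titles): first extremal element, as Python's builtins return
    let lo := rest.foldl (fun acc x => if strLt x.toList acc.toList then x else acc) t
    let hi := rest.foldl (fun acc x => if strLt acc.toList x.toList then x else acc) t
    let a := lo.toList
    let c := hi.toList
    let i := pyLcpWhile a c (min a.length c.length) 0
    let pre := a.take i
    pySnap pre pre.length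

-- ===== PRECONDITION & SPEC =====
def Spec_common_prefix_words_py (titles : List String) (out : String) : Prop := out = common_prefix_words_py_alt titles
instance (titles : List String) (out : String) : Decidable (Spec_common_prefix_words_py titles out) := by unfold Spec_common_prefix_words_py; infer_instance

-- ===== CLAIM (what is proved, stated in full; the proofs are below) =====
def Claim_equal_common_prefix_words_py : Prop := ∀ (titles : List String), Dom_common_prefix_words_py titles → Spec_common_prefix_words_py titles (common_prefix_words_py titles)

-- ===== LEMMAS AND PROOFS =====

-- longest common prefix of two character lists (specification device)
def lcp : List Char → List Char → List Char
  | x :: as, y :: bs => if x = y then x :: lcp as bs else []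
  | _, _ => []

theorem lcp_nil_left (b : List Char) : lcp [] b = [] := by cases b <;> rfl

theorem lcp_prefix_left : ∀ a b : List Char, lcp a b <+: a
  | [], b => by simp [lcp_nil_left]
  | _ :: _, [] => by simp [lcp]
  | x :: as, y :: bs => by
    by_cases h : x = y
    · simpa [lcp, h] using (List.prefix_cons_inj x).mpr (lcp_prefix_left as bs)
    · simp [lcp, h]

theorem lcp_prefix_right : ∀ a b : List Char, lcp a b <+: b
  | [], b => by simp [lcp_nil_left]
  | _ :: _, [] => by simp [lcp]
  | x :: as, y :: bs => by
    by_cases h : x = y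
    · subst h; simpa [lcp] using (List.prefix_cons_inj x).mpr (lcp_prefix_right as bs)
    · simp [lcp, h]

theorem prefix_lcp : ∀ (p a b : List Char), p <+: a → p <+: b → p <+: lcp a b
  | [], _, _, _, _ => by simp
  | q :: ps, x :: as, y :: bs, h1, h2 => by
    obtain ⟨h1a, h1b⟩ := List.cons_prefix_cons.mp h1
    obtain ⟨h2a, h2b⟩ := List.cons_prefix_cons.mp h2
    subst h1a; subst h2a
    simpa [lcp] using (List.prefix_cons_inj q).mpr (prefix_lcp ps as bs h1b h2b)

theorem lcp_length_le_left (a b : List Char) : (lcp a b).length ≤ a.length :=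
  (lcp_prefix_left a b).length_le
theorem lcp_length_le_right (a b : List Char) : (lcp a b).length ≤ b.length :=
  (lcp_prefix_right a b).length_le

theorem lcp_take_left : ∀ (n : Nat) (a b : List Char), lcp (a.take n) b = (lcp a b).take n
  | 0, a, b => by simp [lcp_nil_left]
  | n + 1, [], b => by simp [lcp_nil_left]
  | n + 1, x :: as, [] => by simp [lcp]
  | n + 1, x :: as, y :: bs => by
    by_cases h : x = y
    · simp [lcp, h, lcp_take_left n as bs]
    · simp [lcp, h]

theorem prefix_eq_take {p a : List Char} (h : p <+: a) : p = a.take p.length :=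
  List.prefix_iff_eq_take.mp h

theorem prefix_antisymm {p q : List Char} (h1 : p <+: q) (h2 : q <+: p) : p = q :=
  h1.eq_of_length (Nat.le_antisymm h1.length_le h2.length_le)

theorem strLt_irrefl : ∀ a : List Char, strLt a a = false
  | [] => rfl
  | x :: as => by simp [strLt, strLt_irrefl as]

theorem strLt_trans_false : ∀ a b c : List Char,
    strLt b a = false → strLt c b = false → strLt c a = false
  | a, b, [] => by
    intro h1 h2
    cases b with
    | cons _ _ => simp [strLt] at h2
    | nil =>
      cases a with
      | cons _ _ => simp [strLt] at h1
      | nil => rfl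
  | a, [], z :: cs => by intro h1 h2; cases a <;> simp_all [strLt]
  | [], y :: bs, z :: cs => by intro h1 h2; simp_all [strLt]
  | x :: as, y :: bs, z :: cs => by
    intro h1 h2
    simp only [strLt] at *
    split_ifs at * <;> first
      | rfl
      | (exact strLt_trans_false as bs cs h1 h2)
      | omega

theorem char_eq_of_toNat_eq {x y : Char} (h : x.toNat = y.toNat) : x = y := by
  apply Char.ext
  exact UInt32.toNat_inj.mp h

-- a ≤ b ≤ c (Python's lexicographic order) → lcp a c is a prefix of b
theorem lcp_middle : ∀ a b c : List Char,
    strLt b a = false → strLt c b = false → lcp a c <+: b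
  | [], b, c, _, _ => by simp [lcp_nil_left]
  | x :: as, b, [], _, _ => by simp [lcp]
  | x :: as, [], z :: cs, h1, h2 => by simp [strLt] at h1
  | x :: as, y :: bs, z :: cs, h1, h2 => by
    by_cases hxz : x = z
    · subst hxz
      simp only [strLt] at h1 h2
      rcases Nat.lt_trichotomy y.toNat x.toNat with hlt | heq | hgt
      · simp [hlt] at h1
      · have hyx : y = x := char_eq_of_toNat_eq heq
        subst hyx
        simp only [Nat.lt_irrefl, if_false] at h1 h2
        simpa [lcp] using (List.prefix_cons_inj y).mpr (lcp_middle as bs cs h1 h2)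
      · simp [hgt] at h2
    · simp [lcp, hxz]

theorem lcp_cons (x y : Char) (as bs : List Char) :
    lcp (x :: as) (y :: bs) = if x = y then x :: lcp as bs else [] := rfl

theorem pyLcpWhile_spec (a b : List Char) (m : Nat) (ha : m ≤ a.length) (hb : m ≤ b.length) :
    ∀ i, i ≤ m → pyLcpWhile a b m i = min m (i + (lcp (a.drop i) (b.drop i)).length) := by
  intro i hi
  induction hn : m - i generalizing i with
  | zero =>
    have : i = m := by omega
    subst this
    rw [pyLcpWhile]
    simp
  | succ k ih =>
    have hlt : i < m := by omega
    have hia : i < a.length := by omega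
    have hib : i < b.length := by omega
    rw [pyLcpWhile, dif_pos hlt]
    rw [List.drop_eq_getElem_cons hia, List.drop_eq_getElem_cons hib, lcp_cons]
    by_cases he : a[i] = b[i]
    · rw [if_pos (by simp [hia, hib, he]), if_pos he]
      rw [ih (i + 1) (by omega) (by omega)]
      simp only [List.length_cons]
      omega
    · rw [if_neg (by simp [hia, hib, he]), if_neg he]
      simp only [List.length_nil]
      omega

theorem pyLcpWhile_take (a b : List Char) (n : Nat) (hn : n ≤ a.length) :
    pyLcpWhile a b (min n b.length) 0 = (lcp (a.take n) b).length := by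
  rw [pyLcpWhile_spec a b _ (by omega) (by omega) 0 (by omega)]
  have h2 := lcp_length_le_right a b
  simp [lcp_take_left]
  omega

theorem pyLcpWhile_full (a b : List Char) :
    pyLcpWhile a b (min a.length b.length) 0 = (lcp a b).length := by
  have := pyLcpWhile_take a b a.length (le_refl _)
  simpa using this

theorem foldl_lcp_nil (rest : List String) :
    rest.foldl (fun p s => lcp p s.toList) [] = [] := by
  induction rest with
  | nil => rfl
  | cons s rest ih => simpa [lcp_nil_left] using ih

-- A's title loop followed by any []-to-"" postprocessing S equals S of the fold of pairwise LCPs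
theorem aLoop_snap (base : List Char) (S : List Char → String) :
    ∀ (rest : List String) (n : Nat), n ≤ base.length → S [] = "" →
    (match aLoop base n rest with
      | none => ""
      | some k => S (base.take k))
    = S (rest.foldl (fun p s => lcp p s.toList) (base.take n)) := by
  intro rest
  induction rest with
  | nil => intro n hn hS; simp [aLoop]
  | cons s rest ih =>
    intro n hn hS
    have hw := pyLcpWhile_take base s.toList n hn
    simp only [aLoop, List.foldl_cons]
    rw [hw]
    by_cases h0 : (lcp (base.take n) s.toList).length = 0
    · rw [if_pos h0]
      have : lcp (List.take n base) s.toList = [] := List.eq_nil_of_length_eq_zero h0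
      rw [this, foldl_lcp_nil, hS]
    · rw [if_neg h0]
      have hpre : lcp (base.take n) s.toList = base.take (lcp (base.take n) s.toList).length := by
        have h := (lcp_prefix_left (base.take n) s.toList).trans (List.take_prefix n base)
        exact prefix_eq_take h
      rw [ih _ (by have := lcp_length_le_left (base.take n) s.toList; simp at this; omega) hS, ← hpre]

theorem strLt_asymm : ∀ a b : List Char, strLt a b = true → strLt b a = false
  | a, [], h => by cases a <;> simp [strLt] at h ⊢
  | [], b :: bs, h => rfl
  | x :: as, y :: bs, h => by
    simp only [strLt] at h ⊢
    rcases Nat.lt_trichotomy x.toNat y.toNat with hlt | heq | hgt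
    · simp [hlt, Nat.lt_asymm hlt]
    · simp only [heq, Nat.lt_irrefl, if_false] at h ⊢
      exact strLt_asymm as bs h
    · simp [hgt] at h
      exact absurd h (Nat.lt_asymm hgt)

-- the min-fold's result is ≤ every element of t :: rest
theorem foldMin_le (rest : List String) :
    ∀ t : String, ∀ x ∈ t :: rest,
      strLt x.toList (rest.foldl (fun acc x => if strLt x.toList acc.toList then x else acc) t).toList = false := by
  induction rest with
  | nil => intro t x hx; simp at hx; subst hx; simp [strLt_irrefl]
  | cons s rest ih =>
    intro t x hx
    simp only [List.mem_cons] at hx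
    simp only [List.foldl_cons]
    by_cases hs : strLt s.toList t.toList = true
    · rw [if_pos hs]
      rcases hx with hx | hx | hx
      · -- x = t : t ≥ s ≥ min
        have h1 := ih s s (by simp)
        have h2 := strLt_asymm _ _ hs
        subst hx
        exact strLt_trans_false _ _ _ h1 h2
      · exact ih s x (by simp [hx])
      · exact ih s x (by simp [hx])
    · rw [if_neg hs]
      rcases hx with hx | hx | hx
      · exact ih t x (by simp [hx])
      · subst hx
        have h1 := ih t t (by simp)
        have h2 : strLt x.toList t.toList = false := by simpa using hs
        exact strLt_trans_false _ _ _ h1 h2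
      · exact ih t x (by simp [hx])

-- the max-fold's result is ≥ every element of t :: rest
theorem foldMax_ge (rest : List String) :
    ∀ t : String, ∀ x ∈ t :: rest,
      strLt (rest.foldl (fun acc x => if strLt acc.toList x.toList then x else acc) t).toList x.toList = false := by
  induction rest with
  | nil => intro t x hx; simp at hx; subst hx; simp [strLt_irrefl]
  | cons s rest ih =>
    intro t x hx
    simp only [List.mem_cons] at hx
    simp only [List.foldl_cons]
    by_cases hs : strLt t.toList s.toList = true
    · rw [if_pos hs]
      rcases hx with hx | hx | hx
      · have h1 := ih s s (by simp)
        have h2 := strLt_asymm _ _ hs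
        subst hx
        exact strLt_trans_false _ _ _ h2 h1
      · exact ih s x (by simp [hx])
      · exact ih s x (by simp [hx])
    · rw [if_neg hs]
      rcases hx with hx | hx | hx
      · exact ih t x (by simp [hx])
      · subst hx
        have h1 := ih t t (by simp)
        have h2 : strLt t.toList x.toList = false := by simpa using hs
        exact strLt_trans_false _ _ _ h2 h1
      · exact ih t x (by simp [hx])

theorem fold_mem (f : String → String → Bool) (rest : List String) :
    ∀ t : String, (rest.foldl (fun acc x => if f acc x then x else acc) t) ∈ t :: rest := by
  induction rest with
  | nil => intro t; simp
  | cons s rest ih =>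
    intro t
    simp only [List.foldl_cons]
    by_cases hs : f t s = true
    · rw [if_pos hs]
      have := ih s
      simp at this ⊢; tauto
    · rw [if_neg hs]
      have := ih t
      simp at this ⊢; tauto

theorem foldl_lcp_prefix_init (rest : List String) :
    ∀ p : List Char, rest.foldl (fun p s => lcp p s.toList) p <+: p := by
  induction rest with
  | nil => intro p; simp
  | cons s rest ih =>
    intro p
    simpa using (ih (lcp p s.toList)).trans (lcp_prefix_left p s.toList)

theorem foldl_lcp_prefix_mem (rest : List String) :
    ∀ (p : List Char) (x : String), x ∈ rest →
      rest.foldl (fun p s => lcp p s.toList) p <+: x.toList := by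
  induction rest with
  | nil => intro p x hx; simp at hx
  | cons s rest ih =>
    intro p x hx
    simp only [List.mem_cons] at hx
    simp only [List.foldl_cons]
    rcases hx with hx | hx
    · subst hx
      exact (foldl_lcp_prefix_init rest _).trans (lcp_prefix_right p x.toList)
    · exact ih _ x hx

theorem prefix_foldl_lcp (rest : List String) :
    ∀ (p q : List Char), q <+: p → (∀ x ∈ rest, q <+: x.toList) →
      q <+: rest.foldl (fun p s => lcp p s.toList) p := by
  induction rest with
  | nil => intro p q h _; simpa using h
  | cons s rest ih =>
    intro p q h hall
    simp only [List.foldl_cons]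
    exact ih _ q (prefix_lcp q p s.toList h (hall s (by simp))) (fun x hx => hall x (by simp [hx]))

-- the LCP of all titles equals the LCP of the lexicographic min and max
theorem fold_lcp_eq_lcp_minmax (t : String) (rest : List String) :
    rest.foldl (fun p s => lcp p s.toList) t.toList
      = lcp (rest.foldl (fun acc x => if strLt x.toList acc.toList then x else acc) t).toList
            (rest.foldl (fun acc x => if strLt acc.toList x.toList then x else acc) t).toList := by
  set lo := rest.foldl (fun acc x => if strLt x.toList acc.toList then x else acc) t with hlo
  set hi := rest.foldl (fun acc x => if strLt acc.toList x.toList then x else acc) t with hhi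
  have hloM : lo ∈ t :: rest := fold_mem _ rest t
  have hhiM : hi ∈ t :: rest := fold_mem _ rest t
  have hall : ∀ x ∈ t :: rest, rest.foldl (fun p s => lcp p s.toList) t.toList <+: x.toList := by
    intro x hx
    simp only [List.mem_cons] at hx
    rcases hx with hx | hx
    · subst hx; exact foldl_lcp_prefix_init rest _
    · exact foldl_lcp_prefix_mem rest _ x hx
  have hG : ∀ x ∈ t :: rest, lcp lo.toList hi.toList <+: x.toList := by
    intro x hx
    exact lcp_middle lo.toList x.toList hi.toList (foldMin_le rest t x hx) (foldMax_ge rest t x hx)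
  apply prefix_antisymm
  · exact prefix_lcp _ _ _ (hall lo hloM) (hall hi hhiM)
  · exact prefix_foldl_lcp rest t.toList _ (hG t (by simp)) (fun x hx => hG x (by simp [hx]))

-- ===== VERDICT (by name: the statement is the Claim_ definition above) =====
theorem common_prefix_words_py_spec : Claim_equal_common_prefix_words_py := by
  intro titles _dom
  unfold Spec_common_prefix_words_py
  cases titles with
  | nil => rfl
  | cons t rest =>
    simp only [common_prefix_words_py, common_prefix_words_py_alt]
    have hA := aLoop_snap t.toList (fun p => pySnap p p.length) rest t.toList.length (le_refl _) rfl
    simp only [List.take_length] at hA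
    rw [hA]
    rw [pyLcpWhile_full]
    rw [← prefix_eq_take (lcp_prefix_left _ _)]
    rw [fold_lcp_eq_lcp_minmax]
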